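-- pv_equiv track=rewrite | github.com/AWAlexWeber/python-practice | Other/Companies/Amazon/AmazonBlind/FindHighestProfit.py | findHighestProfit
-- ===== SOURCE A (Python) =====
-- from typing import List
--
-- def findHighestProfit(inventory: List[int], order: int) -> int:
--     # We are going to first sort the inventory in O(nlogn) time where n is the size of our inventory.
--     # Then we are going to iteratively reduce the highest values until our order becomes 0 in O(k) time where k is the number of orders.
--     # This could likely be improved (?)
--     s = sorted(inventory,reverse=True)
--     i, profit = 0, 0
--     while order > 0:
--         if s[0] > s[i]:
--             i = 0
--         if i == len(s) - 1 or s[i] >= s[i + 1]: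
--             profit += s[i]
--             s[i] -= 1
--             order -= 1
--         while i < len(s) - 1 and s[i] < s[i + 1]:
--             i += 1
--     return profit
-- ===== SOURCE B (Python) =====
-- def findHighestProfit(inventory, order):
--     # Batch version: sort descending once, then consume whole equal-height
--     # levels at a time using arithmetic-series sums (O(n log n), no per-unit loop).
--     if order <= 0:
--         return 0
--     s = sorted(inventory, reverse=True)
--     profit = 0
--     rem = order
--     w = 1
--     while w < len(s) and rem > 0:
--         h, nxt = s[w - 1], s[w]
--         cnt = w * (h - nxt)
--         if rem >= cnt:
--             profit += w * (h + nxt + 1) * (h - nxt) // 2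
--             rem -= cnt
--         else:
--             q, r = divmod(rem, w)
--             profit += w * (q * h - q * (q - 1) // 2) + r * (h - q)
--             rem = 0
--         w += 1
--     if rem > 0:
--         n, h = len(s), s[-1]
--         q, r = divmod(rem, n)
--         profit += n * (q * h - q * (q - 1) // 2) + r * (h - q)
--     return profit
-- ===== Notes on version B (the rewrite author's own statement) =====
-- stated objective: faster
-- what changed: B sorts once and consumes whole equal-height levels in batches via divmod and arithmetic-series sums, instead of A's unit-by-unit greedy loop that mutates the sorted list once per order.
import Mathlib
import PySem

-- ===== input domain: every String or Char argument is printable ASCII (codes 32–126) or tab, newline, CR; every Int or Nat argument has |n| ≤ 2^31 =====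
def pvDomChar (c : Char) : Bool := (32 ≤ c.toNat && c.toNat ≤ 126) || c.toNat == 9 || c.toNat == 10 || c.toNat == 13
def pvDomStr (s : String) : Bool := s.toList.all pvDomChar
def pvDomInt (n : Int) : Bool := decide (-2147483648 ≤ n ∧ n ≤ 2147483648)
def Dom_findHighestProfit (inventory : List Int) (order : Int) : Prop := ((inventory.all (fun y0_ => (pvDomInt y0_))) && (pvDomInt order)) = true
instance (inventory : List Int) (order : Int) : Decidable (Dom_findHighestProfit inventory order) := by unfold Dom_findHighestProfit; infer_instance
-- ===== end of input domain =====

-- B replaces A's one-unit-per-iteration greedy loop (O(n log n + order)) by batch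
-- consumption of whole equal-height levels with arithmetic-series sums (O(n log n)).

-- ===== PORT A =====
-- inner `while i < len(s) - 1 and s[i] < s[i + 1]: i += 1`; fuel ≥ s.length suffices
-- (i only moves right).  i is kept as a Nat: in Python i starts at 0 and is only
-- ever incremented or reset to 0, so it is provably nonnegative.
def aInner (s : List Int) : Nat → Nat → Nat
  | 0, i => i
  | f+1, i =>
    if i < s.length - 1 then
      match s[i]?, s[i+1]? with
      | some a, some b => if a < b then aInner s f (i+1) else i
      | _, _ => i
    else i

-- outer `while order > 0`; one unit is sold per iteration, so fuel = order.toNat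
-- suffices (proved below); running out of fuel coincides with the guard failing.
-- `none` lookups correspond to Python's IndexError (only reachable outside Pre_).
def aLoop : Nat → List Int → Nat → Int → Int → Int
  | 0, _, _, _, profit => profit
  | f+1, s, i, order, profit =>
    if 0 < order then
      match s[0]?, s[i]? with
      | some s0, some si0 =>
        -- if s[0] > s[i]: i = 0
        let i' : Nat := if si0 < s0 then 0 else i
        let si : Int := if si0 < s0 then s0 else si0
        -- if i == len(s) - 1 or s[i] >= s[i + 1]  (short-circuit `or`)
        let tk : Bool :=
          if i' = s.length - 1 then true
          else match s[i'+1]? with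
               | some t => decide (t ≤ si)
               | none => true   -- unreachable: i' + 1 < s.length here
        -- profit += s[i]; s[i] -= 1; order -= 1
        let s' := if tk then s.set i' (si - 1) else s
        let order' := if tk then order - 1 else order
        let profit' := if tk then profit + si else profit
        aLoop f s' (aInner s' s'.length i') order' profit'
      | _, _ => profit
    else profit

def findHighestProfit (inventory : List Int) (order : Int) : Int :=
  let s := PySem.List.sorted inventory id true
  aLoop order.toNat s 0 order 0

-- ===== PORT B =====
-- `while w < len(s) and rem > 0`: w grows by 1 each iteration, fuel = len(s) suffices.
def bLoop : Nat → List Int → Int → Int → Nat → Int × Int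
  | 0, _, profit, rem, _ => (profit, rem)
  | f+1, s, profit, rem, w =>
    if w < s.length ∧ 0 < rem then
      match s[w-1]?, s[w]? with
      | some h, some nxt =>
        let cnt : Int := (w : Int) * (h - nxt)
        if cnt ≤ rem then
          bLoop f s (profit + PySem.Int.floordiv ((w : Int) * (h + nxt + 1) * (h - nxt)) 2) (rem - cnt) (w+1)
        else
          match PySem.Int.divmod? rem (w : Int) with
          | some (q, r) => bLoop f s (profit + (w : Int) * (q * h - PySem.Int.floordiv (q * (q - 1)) 2) + r * (h - q)) 0 (w+1)
          | none => (profit, rem)   -- unreachable: w ≥ 1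
      | _, _ => (profit, rem)       -- unreachable: 0 ≤ w-1 < w < len
    else (profit, rem)

def findHighestProfit_alt (inventory : List Int) (order : Int) : Int :=
  if order ≤ 0 then 0
  else
    let s := PySem.List.sorted inventory id true
    let pr := bLoop s.length s 0 order 1
    if 0 < pr.2 then
      match PySem.List.pyGet? s (-1) with    -- s[-1]; none = IndexError (outside Pre_)
      | some h =>
        let n : Int := (s.length : Int)
        match PySem.Int.divmod? pr.2 n with
        | some (q, r) => pr.1 + n * (q * h - PySem.Int.floordiv (q * (q - 1)) 2) + r * (h - q)
        | none => pr.1               -- unreachable given s[-1] succeeded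
      | none => pr.1
    else pr.1

-- ===== PRECONDITION & SPEC =====
-- Pre_ excludes only the inputs where Python A raises IndexError: an empty
-- inventory together with a positive order (`s[0]` on an empty list).
def Pre_findHighestProfit (inventory : List Int) (order : Int) : Prop :=
  inventory = [] → order ≤ 0
instance (inventory : List Int) (order : Int) : Decidable (Pre_findHighestProfit inventory order) := by unfold Pre_findHighestProfit; infer_instance

def pvWitness_findHighestProfit : List Int × Int := ([3, 2, 2], 5)

def Spec_findHighestProfit (inventory : List Int) (order : Int) (out : Int) : Prop := out = findHighestProfit_alt inventory order
instance (inventory : List Int) (order : Int) (out : Int) : Decidable (Spec_findHighestProfit inventory order out) := by unfold Spec_findHighestProfit; infer_instance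

-- ===== CLAIM (what is proved, stated in full; the proofs are below) =====
def Claim_equal_findHighestProfit : Prop := ∀ (inventory : List Int) (order : Int), Dom_findHighestProfit inventory order → Pre_findHighestProfit inventory order → Spec_findHighestProfit inventory order (findHighestProfit inventory order)

-- ===== LEMMAS AND PROOFS =====

-- greedy reference: each step sells one unit of the current maximum
def gstep (l : List Int) : List Int :=
  match l.max? with
  | some M => (M - 1) :: l.erase M
  | none => l

def R : List Int → Nat → Int
  | _, 0 => 0
  | l, k+1 =>
    match l.max? with
    | some M => M + R ((M - 1) :: l.erase M) k
    | none => 0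

def nth (s : List Int) (j : Nat) : Int := s.getD j 0

theorem nth_lt {s : List Int} {j : Nat} (h : j < s.length) : nth s j = s[j] := by
  simp [nth, List.getD_eq_getElem?_getD, List.getElem?_eq_getElem h]

theorem max?_perm {l l' : List Int} (h : l.Perm l') : l.max? = l'.max? := by
  cases hl : l'.max? with
  | none =>
    rw [List.max?_eq_none_iff] at hl
    subst hl
    rw [List.max?_eq_none_iff]
    exact h.eq_nil
  | some M =>
    rw [List.max?_eq_some_iff] at hl ⊢
    exact ⟨h.mem_iff.mpr hl.1, fun b hb => hl.2 b (h.mem_iff.mp hb)⟩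

theorem R_perm : ∀ (k : Nat) {l l' : List Int}, l.Perm l' → R l k = R l' k := by
  intro k
  induction k with
  | zero => intro l l' _; rfl
  | succ k ih =>
    intro l l' h
    simp only [R]
    rw [max?_perm h]
    cases hm : l'.max? with
    | none => rfl
    | some M =>
      show M + R ((M - 1) :: l.erase M) k = M + R ((M - 1) :: l'.erase M) k
      rw [ih ((h.erase M).cons (M - 1))]

theorem gstep_perm {l l' : List Int} (h : l.Perm l') : (gstep l).Perm (gstep l') := by
  simp only [gstep]
  rw [max?_perm h]
  cases hm : l'.max? with
  | none => exact h
  | some M => exact (h.erase M).cons _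

theorem iterate_gstep_perm (k : Nat) {l l' : List Int} (h : l.Perm l') :
    (gstep^[k] l).Perm (gstep^[k] l') := by
  induction k generalizing l l' with
  | zero => exact h
  | succ k ih => rw [Function.iterate_succ_apply, Function.iterate_succ_apply]; exact ih (gstep_perm h)

theorem R_succ_max {l : List Int} {M : Int} (k : Nat) (h : l.max? = some M) :
    R l (k+1) = M + R (gstep l) k := by
  simp only [R, gstep, h]

theorem R_none {l : List Int} (k : Nat) (h : l.max? = none) : R l k = 0 := by
  cases k with
  | zero => rfl
  | succ k => simp only [R, h]

theorem R_add (a b : Nat) : ∀ l : List Int, R l (a + b) = R l a + R (gstep^[a] l) b := by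
  induction a with
  | zero => intro l; simp [R]
  | succ a ih =>
    intro l
    cases hm : l.max? with
    | none =>
      have hg : gstep l = l := by simp only [gstep, hm]
      have hfix : ∀ n, gstep^[n] l = l := by
        intro n
        induction n with
        | zero => rfl
        | succ n ihn => rw [Function.iterate_succ_apply, hg, ihn]
      rw [hfix, R_none _ hm, R_none _ hm, R_none _ hm]
      simp
    | some M =>
      have h1 : a + 1 + b = (a + b) + 1 := by omega
      rw [h1, R_succ_max _ hm, R_succ_max _ hm, ih (gstep l), Function.iterate_succ_apply]
      ring

theorem max?_of_bound {l : List Int} {M : Int} (hm : M ∈ l) (hb : ∀ x ∈ l, x ≤ M) :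
    l.max? = some M := List.max?_eq_some_iff.mpr ⟨hm, hb⟩

theorem gstep_cons_top {h : Int} {rest : List Int} (hle : ∀ x ∈ rest, x ≤ h) :
    gstep (h :: rest) = (h - 1) :: rest := by
  have hm : (h :: rest).max? = some h := by
    apply max?_of_bound (List.mem_cons_self)
    intro x hx
    rcases List.mem_cons.mp hx with rfl | hx
    · exact le_refl _
    · exact hle x hx
  simp only [gstep, hm, List.erase_cons_head]

def Tri : Nat → Int := fun d => ∑ j ∈ Finset.range d, (j : Int)

theorem Tri_succ (d : Nat) : Tri (d+1) = Tri d + d := by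
  simp [Tri, Finset.sum_range_succ]

theorem two_Tri (d : Nat) : 2 * Tri d = (d : Int) * ((d : Int) - 1) := by
  induction d with
  | zero => simp [Tri]
  | succ d ih =>
    rw [Tri_succ, mul_add, ih]
    push_cast
    ring

theorem Tri_floordiv (q : Nat) :
    PySem.Int.floordiv ((q : Int) * ((q : Int) - 1)) 2 = Tri q := by
  rw [← two_Tri, PySem.Int.floordiv_eq_ediv_of_pos (by norm_num)]
  exact Int.mul_ediv_cancel_left _ (by norm_num)

theorem level_partial : ∀ (r a : Nat) (h : Int) (rest : List Int), r ≤ a →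
    (∀ x ∈ rest, x ≤ h - 1) →
    R (List.replicate a h ++ rest) r = r * h ∧
    (gstep^[r] (List.replicate a h ++ rest)).Perm
      (List.replicate (a - r) h ++ (List.replicate r (h-1) ++ rest)) := by
  intro r
  induction r with
  | zero => intro a h rest _ _; exact ⟨by simp [R], by simp⟩
  | succ r ih =>
    intro a h rest hra hrest
    obtain ⟨a, rfl⟩ : ∃ a', a = a' + 1 := ⟨a - 1, by omega⟩
    have hall : ∀ x ∈ List.replicate a h ++ rest, x ≤ h := by
      intro x hx
      rcases List.mem_append.mp hx with hx | hx
      · rw [List.eq_of_mem_replicate hx]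
      · have := hrest x hx; omega
    have hcons : List.replicate (a+1) h ++ rest = h :: (List.replicate a h ++ rest) := by
      simp [List.replicate_succ]
    have hmax : ((h : Int) :: (List.replicate a h ++ rest)).max? = some h := by
      apply max?_of_bound (List.mem_cons_self)
      intro x hx
      rcases List.mem_cons.mp hx with rfl | hx
      · exact le_refl _
      · exact hall x hx
    have hg : gstep (h :: (List.replicate a h ++ rest)) = (h-1) :: (List.replicate a h ++ rest) :=
      gstep_cons_top hall
    have hperm : ((h-1) :: (List.replicate a h ++ rest)).Perm (List.replicate a h ++ ((h-1) :: rest)) :=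
      List.perm_middle.symm
    have hrest' : ∀ x ∈ (h-1) :: rest, x ≤ h - 1 := by
      intro x hx
      rcases List.mem_cons.mp hx with rfl | hx
      · exact le_refl _
      · exact hrest x hx
    obtain ⟨ih1, ih2⟩ := ih a h ((h-1) :: rest) (by omega) hrest'
    have hshift : List.replicate (a - r) h ++ (List.replicate r (h-1) ++ ((h-1) :: rest))
        = List.replicate (a + 1 - (r + 1)) h ++ (List.replicate (r+1) (h-1) ++ rest) := by
      rw [Nat.succ_sub_succ, List.replicate_succ' (n := r), List.append_assoc]
      simp
    constructor
    · rw [hcons, R_succ_max _ hmax, hg, R_perm r hperm, ih1]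
      push_cast
      ring
    · rw [hcons, Function.iterate_succ_apply, hg]
      refine ((iterate_gstep_perm r hperm).trans ih2).trans ?_
      rw [hshift]

theorem levels : ∀ (d a : Nat) (h : Int) (rest : List Int), 0 < a →
    (∀ x ∈ rest, x ≤ h - d) →
    R (List.replicate a h ++ rest) (a * d) = a * ((d : Int) * h - Tri d) ∧
    (gstep^[a * d] (List.replicate a h ++ rest)).Perm
      (List.replicate a (h - d) ++ rest) := by
  intro d
  induction d with
  | zero =>
    intro a h rest _ _
    constructor
    · simp [R, Tri]
    · simp
  | succ d ih =>
    intro a h rest ha hrest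
    have hsplit : a * (d + 1) = a + a * d := by ring
    obtain ⟨lp1, lp2⟩ := level_partial a a h rest (le_refl a)
      (by intro x hx; have := hrest x hx; push_cast at this ⊢; omega)
    have lp2' : (gstep^[a] (List.replicate a h ++ rest)).Perm
        (List.replicate a (h-1) ++ rest) := by
      refine lp2.trans ?_
      simp
    obtain ⟨ih1, ih2⟩ := ih a (h-1) rest ha
      (by intro x hx; have := hrest x hx; push_cast at this ⊢; omega)
    constructor
    · rw [hsplit, R_add a (a*d), lp1, R_perm (a*d) lp2', ih1, Tri_succ]
      push_cast
      ring
    · have hsplit2 : a * (d + 1) = a * d + a := by ring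
      rw [hsplit2, Function.iterate_add_apply]
      refine ((iterate_gstep_perm (a*d) lp2').trans ih2).trans ?_
      have : h - 1 - (d : Int) = h - ((d : Nat) + 1 : Int) := by ring
      rw [this]
      push_cast
      exact List.Perm.refl _

theorem batch_partial (q r a : Nat) (h : Int) (rest : List Int) (ha : 0 < a) (hr : r < a)
    (hrest : ∀ x ∈ rest, x ≤ h - q - 1) :
    R (List.replicate a h ++ rest) (a * q + r)
      = a * ((q : Int) * h - Tri q) + r * (h - (q : Int)) := by
  obtain ⟨l1, l2⟩ := levels q a h rest ha (by intro x hx; have := hrest x hx; omega)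
  obtain ⟨p1, _⟩ := level_partial r a (h - q) rest (le_of_lt hr)
    (by intro x hx; have := hrest x hx; omega)
  rw [R_add (a*q) r, l1, R_perm r l2, p1]

-- ===== A-side: loop invariant =====

def SE (s : List Int) (i : Nat) : Prop :=
  ∀ j : Nat, j + 1 < s.length → j + 1 ≠ i → nth s (j+1) ≤ nth s j

def InvA (s : List Int) (i : Nat) : Prop :=
  i < s.length ∧ SE s i ∧
  (0 < i → nth s (i-1) < nth s i → nth s (i-1) = nth s i - 1 ∧ nth s 0 ≤ nth s i)

theorem chain_le (s : List Int) (a : Nat) :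
    ∀ b, a ≤ b → (∀ j, a ≤ j → j + 1 ≤ b → nth s (j+1) ≤ nth s j) → nth s b ≤ nth s a := by
  intro b
  induction b with
  | zero => intro h _; interval_cases a; exact le_refl _
  | succ b ihb =>
    intro hab hstep
    rcases Nat.lt_or_ge a (b+1) with h | h
    · have h1 : nth s (b+1) ≤ nth s b := hstep b (by omega) (le_refl _)
      have h2 : nth s b ≤ nth s a := ihb (by omega) (fun j hj hjb => hstep j hj (by omega))
      omega
    · have : a = b + 1 := by omega
      rw [this]

theorem sorted_all_le_head (s : List Int)
    (hsort : ∀ j, j + 1 < s.length → nth s (j+1) ≤ nth s j) :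
    ∀ j, j < s.length → nth s j ≤ nth s 0 := by
  intro j hj
  exact chain_le s 0 j (Nat.zero_le _) (fun j' _ hj' => hsort j' (by omega))

theorem mem_le_of_nth {s : List Int} {v : Int}
    (hb : ∀ j, j < s.length → nth s j ≤ v) : ∀ x ∈ s, x ≤ v := by
  intro x hx
  obtain ⟨j, hj, rfl⟩ := List.mem_iff_getElem.mp hx
  rw [← nth_lt hj]
  exact hb j hj

theorem set_perm (s : List Int) (i : Nat) (hi : i < s.length) (v : Int) :
    (s.set i v).Perm (v :: s.erase (nth s i)) := by
  rw [List.perm_iff_count]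
  intro a
  have hsplit : s = s.take i ++ s[i] :: s.drop (i+1) := by
    conv_lhs => rw [← List.take_append_drop i s]
    rw [List.drop_eq_getElem_cons hi]
  have hset : s.set i v = s.take i ++ v :: s.drop (i+1) := by
    rw [List.set_eq_take_append_cons_drop, if_pos hi]
  have hM : nth s i = s[i] := nth_lt hi
  have hcount : List.count a s
      = List.count a (s.take i) + (List.count a (List.drop (i+1) s) + if a = s[i] then 1 else 0) := by
    conv_lhs => rw [hsplit]
    rw [List.count_append, List.count_cons]
    simp only [beq_iff_eq]
    split_ifs <;> omega
  rw [hset, hM]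
  simp only [List.count_append, List.count_cons, List.count_erase, beq_iff_eq]
  rw [hcount]
  split_ifs <;> omega

-- aInner evaluation
theorem aInner_stop (s : List Int) (f i : Nat)
    (h : i + 1 < s.length → ¬ (nth s i < nth s (i+1))) : aInner s f i = i := by
  cases f with
  | zero => rfl
  | succ f =>
    simp only [aInner]
    split
    · rename_i hlt
      have h1 : i + 1 < s.length := by omega
      rw [List.getElem?_eq_getElem (by omega), List.getElem?_eq_getElem h1]
      simp only
      rw [if_neg]
      rw [← nth_lt (by omega : i < s.length), ← nth_lt h1]
      exact h h1
    · rfl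

theorem aInner_step (s : List Int) (f i : Nat) (h1 : i + 1 < s.length)
    (h2 : nth s i < nth s (i+1)) : aInner s (f+1) i = aInner s f (i+1) := by
  simp only [aInner]
  rw [if_pos (by omega)]
  rw [List.getElem?_eq_getElem (by omega), List.getElem?_eq_getElem h1]
  simp only
  rw [if_pos]
  rw [nth_lt (by omega : i < s.length), nth_lt h1] at h2
  exact h2

theorem nth_set_ne {s : List Int} {i j : Nat} {v : Int} (h : j ≠ i) :
    nth (s.set i v) j = nth s j := by
  simp [nth, List.getD_eq_getElem?_getD, List.getElem?_set_ne (Ne.symm h)]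

theorem nth_set_eq {s : List Int} {i : Nat} {v : Int} (h : i < s.length) :
    nth (s.set i v) i = v := by
  simp [nth, List.getD_eq_getElem?_getD, List.getElem?_set_self h]

theorem step_preserves (s : List Int) (i' : Nat) (hi' : i' < s.length)
    (hmax : ∀ j, j < s.length → nth s j ≤ nth s i')
    (hse : SE s i')
    (hpre : 0 < i' → nth s i' - 1 ≤ nth s (i'-1)) :
    InvA (s.set i' (nth s i' - 1)) (aInner (s.set i' (nth s i' - 1)) (s.set i' (nth s i' - 1)).length i') := by
  set si := nth s i' with hsi
  set s' := s.set i' (si - 1) with hs'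
  have hlen : s'.length = s.length := by simp [hs']
  have hne : ∀ j : Nat, j ≠ i' → nth s' j = nth s j := fun j hj => nth_set_ne hj
  have heq : nth s' i' = si - 1 := nth_set_eq hi'
  by_cases hX : i' + 1 < s.length ∧ nth s (i'+1) = si
  · obtain ⟨hX1, hX2⟩ := hX
    have hi'' : aInner s' s'.length i' = i' + 1 := by
      have hstep : nth s' i' < nth s' (i'+1) := by
        rw [heq, hne (i'+1) (by omega), hX2]; omega
      have hlen2 : s'.length = (s'.length - 1) + 1 := by rw [hlen]; omega
      rw [hlen2, aInner_step s' _ i' (by rw [hlen]; omega) hstep]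
      apply aInner_stop
      intro h2
      rw [hne (i'+1) (by omega), hne (i'+2) (by omega), hX2]
      rw [hlen] at h2
      have := hmax (i'+2) (by omega)
      omega
    rw [hi'']
    refine ⟨by rw [hlen]; omega, ?_, ?_⟩
    · intro j hj hne2
      rw [hlen] at hj
      rcases Nat.lt_or_ge (j+1) (i'+1) with hlt | hge
      · rcases Nat.eq_or_lt_of_le (by omega : j + 1 ≤ i') with he | hlt2
        · have h0 : 0 < i' := by omega
          have hj2 : j = i' - 1 := by omega
          rw [he, heq, hne j (by omega), hj2]
          exact hpre h0
        · rw [hne (j+1) (by omega), hne j (by omega)]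
          exact hse j (by omega) (by omega)
      · have hge2 : i' + 1 ≤ j := by omega
        rcases Nat.eq_or_lt_of_le hge2 with he | hlt2
        · rw [← he, hne (i'+1+1) (by omega), hne (i'+1) (by omega), hX2]
          rw [← he] at hj
          exact hmax (i'+1+1) (by omega)
        · rw [hne (j+1) (by omega), hne j (by omega)]
          exact hse j (by omega) (by omega)
    · intro _ hv
      have hr : i' + 1 - 1 = i' := rfl
      constructor
      · rw [hr, heq, hne (i'+1) (by omega), hX2]
      · rw [hne (i'+1) (by omega), hX2]
        by_cases h0 : i' = 0
        · rw [← h0, heq]; omega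
        · rw [hne 0 (by omega)]
          have := hmax 0 (by omega)
          omega
  · push Not at hX
    have hstop : i' + 1 < s'.length → ¬ (nth s' i' < nth s' (i'+1)) := by
      intro hl
      rw [hlen] at hl
      rw [heq, hne (i'+1) (by omega)]
      have h1 := hmax (i'+1) hl
      have h2 := hX hl
      omega
    rw [aInner_stop s' _ i' hstop]
    refine ⟨by rw [hlen]; omega, ?_, ?_⟩
    · intro j hj hne2
      rw [hlen] at hj
      by_cases hji : j = i'
      · subst hji
        rw [heq, hne (j+1) (by omega)]
        have h1 := hmax (j+1) hj
        have h2 := hX hj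
        omega
      · rw [hne (j+1) hne2, hne j hji]
        exact hse j hj hne2
    · intro h0 hv
      exfalso
      rw [hne (i'-1) (by omega), heq] at hv
      have := hpre h0
      omega

theorem aLoop_eq : ∀ (f : Nat) (s : List Int) (i : Nat) (profit : Int), InvA s i →
    aLoop f s i (f : Int) profit = profit + R s f := by
  intro f
  induction f with
  | zero => intro s i profit _; simp [aLoop, R]
  | succ f ih =>
    intro s i profit hInv
    obtain ⟨hi, hse, hthird⟩ := hInv
    have hL : 0 < s.length := by omega
    have h0v : s[0]? = some s[0] := List.getElem?_eq_getElem hL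
    have hiv : s[i]? = some s[i] := List.getElem?_eq_getElem hi
    have hsorted_res : s[i] < s[0] → ∀ j, j + 1 < s.length → nth s (j+1) ≤ nth s j := by
      intro hres j hj
      by_cases hji : j + 1 = i
      · have hii : 0 < i := by omega
        by_contra hc
        push Not at hc
        have hj2 : j = i - 1 := by omega
        rw [hji, hj2] at hc
        obtain ⟨_, h02⟩ := hthird hii hc
        rw [nth_lt hL, nth_lt hi] at h02
        omega
      · exact hse j hj hji
    have hmax : ∀ j, j < s.length → nth s j ≤ nth s (if s[i] < s[0] then 0 else i) := by
      intro j hj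
      by_cases hres : s[i] < s[0]
      · rw [if_pos hres]
        exact sorted_all_le_head s (hsorted_res hres) j hj
      · rw [if_neg hres]
        push Not at hres
        rcases Nat.lt_or_ge j i with hij | hij
        · have h1 : nth s j ≤ nth s 0 :=
            chain_le s 0 j (Nat.zero_le _) (fun j' h1 h2 => hse j' (by omega) (by omega))
          have h2 : nth s 0 ≤ nth s i := by rw [nth_lt hL, nth_lt hi]; exact hres
          omega
        · exact chain_le s i j hij (fun j' h1 h2 => hse j' (by omega) (by omega))
    have hse' : SE s (if s[i] < s[0] then 0 else i) := by
      by_cases hres : s[i] < s[0]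
      · rw [if_pos hres]; intro j hj _; exact hsorted_res hres j hj
      · rw [if_neg hres]; exact hse
    have hpre : 0 < (if s[i] < s[0] then 0 else i) →
        nth s (if s[i] < s[0] then 0 else i) - 1 ≤ nth s ((if s[i] < s[0] then 0 else i) - 1) := by
      intro h0
      by_cases hres : s[i] < s[0]
      · rw [if_pos hres] at h0; omega
      · rw [if_neg hres] at h0 ⊢
        by_cases hv : nth s (i-1) < nth s i
        · obtain ⟨he, _⟩ := hthird h0 hv
          omega
        · omega
    have hii' : (if s[i] < s[0] then 0 else i) < s.length := by
      by_cases hres : s[i] < s[0] <;> simp [hres, hL, hi]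
    have hsival : (if s[i] < s[0] then s[0] else s[i]) = nth s (if s[i] < s[0] then 0 else i) := by
      by_cases hres : s[i] < s[0] <;> simp [hres, nth_lt hL, nth_lt hi]
    have hguard : (0:Int) < ((f+1 : Nat) : Int) := by exact_mod_cast Nat.succ_pos f
    have htk : (if (if s[i] < s[0] then 0 else i) = s.length - 1 then true
        else match s[(if s[i] < s[0] then 0 else i)+1]? with
             | some t => decide (t ≤ (if s[i] < s[0] then s[0] else s[i]))
             | none => true) = true := by
      by_cases hl : (if s[i] < s[0] then 0 else i) = s.length - 1
      · rw [if_pos hl]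
      · rw [if_neg hl, List.getElem?_eq_getElem (show (if s[i] < s[0] then 0 else i)+1 < s.length by omega)]
        simp only [decide_eq_true_eq]
        rw [hsival, ← nth_lt (show (if s[i] < s[0] then 0 else i)+1 < s.length by omega)]
        exact hmax _ (by omega)
    have hmaxS : s.max? = some (nth s (if s[i] < s[0] then 0 else i)) :=
      max?_of_bound (by rw [nth_lt hii']; exact List.getElem_mem hii') (mem_le_of_nth hmax)
    have hstep := step_preserves s (if s[i] < s[0] then 0 else i) hii' hmax hse' hpre
    have hcast : ((f+1 : Nat) : Int) - 1 = (f : Nat) := by push_cast; ring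
    simp only [aLoop, if_pos hguard, h0v, hiv, htk, if_pos]
    simp only [hsival, hcast]
    rw [ih _ _ _ hstep, R_succ_max f hmaxS]
    have hg : gstep s = (nth s (if s[i] < s[0] then 0 else i) - 1)
        :: s.erase (nth s (if s[i] < s[0] then 0 else i)) := by
      simp only [gstep, hmaxS]
    rw [hg]
    rw [R_perm f (set_perm s _ hii' _)]
    ring


-- ===== B-side =====

def SDP (s : List Int) : Prop := ∀ j, j + 1 < s.length → nth s (j+1) ≤ nth s j

def bTail (s : List Int) (pr : Int × Int) : Int :=
  if 0 < pr.2 then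
    match PySem.List.pyGet? s (-1) with
    | some h =>
      match PySem.Int.divmod? pr.2 ((s.length : Nat) : Int) with
      | some (q, r) => pr.1 + ((s.length : Nat) : Int) * (q * h - PySem.Int.floordiv (q * (q - 1)) 2) + r * (h - q)
      | none => pr.1
    | none => pr.1
  else pr.1

theorem sdp_le (s : List Int) (hs : SDP s) {j k : Nat} (hjk : j ≤ k) (hk : k < s.length) :
    nth s k ≤ nth s j :=
  chain_le s j k hjk (fun j' _ h2 => hs j' (by omega))

theorem drop_le (s : List Int) (hs : SDP s) (w : Nat) (hw : w < s.length) :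
    ∀ x ∈ s.drop w, x ≤ nth s w := by
  intro x hx
  obtain ⟨t, ht, hval⟩ := List.mem_iff_getElem.mp hx
  rw [List.getElem_drop] at hval
  have htl : w + t < s.length := by
    have := ht
    rw [List.length_drop] at this
    omega
  rw [← hval, ← nth_lt htl]
  exact sdp_le s hs (by omega) htl

theorem bLoop_zero_rem (f : Nat) (s : List Int) (profit : Int) (w : Nat) :
    bLoop f s profit 0 w = (profit, 0) := by
  cases f with
  | zero => rfl
  | succ f => simp [bLoop]

theorem bTail_zero (s : List Int) (profit : Int) : bTail s (profit, 0) = profit := by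
  simp [bTail]

theorem bTerm (s : List Int) (w : Nat) (profit rem : Int) (h1 : 1 ≤ w) (h2 : w ≤ s.length)
    (hterm : w = s.length ∨ rem = 0) (hrem : 0 ≤ rem) :
    bTail s (profit, rem) = profit + R (List.replicate w (nth s (w-1)) ++ s.drop w) rem.toNat := by
  by_cases hr : 0 < rem
  · have hw : w = s.length := by
      rcases hterm with h | h
      · exact h
      · omega
    subst hw
    have hL : 0 < s.length := by omega
    have hsne : s ≠ [] := by
      intro hnil
      rw [hnil] at hL
      simp at hL
    have hget : PySem.List.pyGet? s (-1) = some (nth s (s.length - 1)) := by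
      rw [PySem.List.pyGet?_neg_one, List.getLast?_eq_getElem?,
        List.getElem?_eq_getElem (by omega), nth_lt (by omega)]
    have hnz : ((s.length : Nat) : Int) ≠ 0 := by
      simp only [ne_eq, Nat.cast_eq_zero]
      omega
    have hdm : PySem.Int.divmod? rem ((s.length : Nat) : Int)
        = some (PySem.Int.floordiv rem ((s.length : Nat) : Int), PySem.Int.mod rem ((s.length : Nat) : Int)) := by
      simp [PySem.Int.divmod?, PySem.Int.floordiv, PySem.Int.mod, hsne]
    have hLc : (0:Int) < ((s.length : Nat) : Int) := by exact_mod_cast hL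
    have hqr := PySem.Int.floordiv_mul_add_mod rem ((s.length : Nat) : Int)
    have hq0 : 0 ≤ PySem.Int.floordiv rem ((s.length : Nat) : Int) := by
      rw [PySem.Int.floordiv_eq_ediv_of_pos hLc]
      exact Int.ediv_nonneg hrem (by omega)
    have hr0 : 0 ≤ PySem.Int.mod rem ((s.length : Nat) : Int) := PySem.Int.mod_nonneg rem hLc
    have hrlt : PySem.Int.mod rem ((s.length : Nat) : Int) < ((s.length : Nat) : Int) := by
      rw [PySem.Int.mod_eq_emod_of_pos hLc]
      exact Int.emod_lt_of_pos rem hLc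
    set q := PySem.Int.floordiv rem ((s.length : Nat) : Int) with hqdef
    set r := PySem.Int.mod rem ((s.length : Nat) : Int) with hrdef
    have hb := batch_partial q.toNat r.toNat s.length (nth s (s.length - 1)) [] hL
      (by omega) (by intro x hx; simp at hx)
    have hcast : ((s.length : Nat) : Int) * q = ((s.length * q.toNat : Nat) : Int) := by
      push_cast
      rw [Int.toNat_of_nonneg hq0]
    have h5 : rem = ((s.length * q.toNat : Nat) : Int) + r := by
      rw [← hcast]
      linarith [hqr]
    have hsum : rem.toNat = s.length * q.toNat + r.toNat := by omega
    simp only [bTail, if_pos hr, hget, hdm]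
    have hq' : ((q.toNat : Nat) : Int) = q := Int.toNat_of_nonneg hq0
    have hr' : ((r.toNat : Nat) : Int) = r := Int.toNat_of_nonneg hr0
    rw [hq', hr'] at hb
    have hTri : PySem.Int.floordiv (q * (q - 1)) 2 = Tri q.toNat := by
      rw [← hq']
      exact Tri_floordiv q.toNat
    rw [List.drop_length, hsum, hb, hTri]
    ring
  · have hz : rem = 0 := by omega
    subst hz
    rw [bTail_zero]
    simp [R]

theorem bLoop_eq (s : List Int) (hs : SDP s) :
    ∀ (f w : Nat) (profit rem : Int), 1 ≤ w → w ≤ s.length → s.length ≤ w + f → 0 ≤ rem →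
    bTail s (bLoop f s profit rem w)
      = profit + R (List.replicate w (nth s (w-1)) ++ s.drop w) rem.toNat := by
  intro f
  induction f with
  | zero =>
    intro w profit rem hw1 hw2 hwf hrem
    exact bTerm s w profit rem hw1 hw2 (by omega) hrem
  | succ f ih =>
    intro w profit rem hw1 hw2 hwf hrem
    by_cases hg : w < s.length ∧ 0 < rem
    · obtain ⟨hw, hr⟩ := hg
      have hw1' : w - 1 < s.length := by omega
      have e1 : s[w-1]? = some s[w-1] := List.getElem?_eq_getElem hw1'
      have e2 : s[w]? = some s[w] := List.getElem?_eq_getElem hw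
      have n1 : s[w-1] = nth s (w-1) := (nth_lt hw1').symm
      have n2 : s[w] = nth s w := (nth_lt hw).symm
      have hhn : nth s w ≤ nth s (w-1) := sdp_le s hs (by omega) hw
      set d := (nth s (w-1) - nth s w).toNat with hd
      have hdc : ((d : Nat) : Int) = nth s (w-1) - nth s w := by
        rw [hd, Int.toNat_of_nonneg (by omega)]
      have hdropw : List.replicate w (nth s w) ++ ((nth s w) :: s.drop (w+1))
          = List.replicate (w+1) (nth s w) ++ s.drop (w+1) := by
        rw [List.replicate_succ' (n := w), List.append_assoc]
        simp
      simp only [bLoop, if_pos (show w < s.length ∧ 0 < rem from ⟨hw, hr⟩), e1, e2, n1, n2]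
      by_cases hc : (w:Int) * (nth s (w-1) - nth s w) ≤ rem
      · rw [if_pos hc]
        have hcnt : (w:Int) * (nth s (w-1) - nth s w) = ((w*d : Nat) : Int) := by
          rw [← hdc]
          push_cast
          ring
        have ihh := ih (w+1)
          (profit + PySem.Int.floordiv ((w:Int) * (nth s (w-1) + nth s w + 1) * (nth s (w-1) - nth s w)) 2)
          (rem - (w:Int) * (nth s (w-1) - nth s w))
          (by omega) (by omega) (by omega) (by omega)
        rw [ihh]
        have hsum : rem.toNat = w * d + (rem - (w:Int) * (nth s (w-1) - nth s w)).toNat := by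
          rw [hcnt] at hc ⊢
          omega
        obtain ⟨lv1, lv2⟩ := levels d w (nth s (w-1)) (s.drop w) (by omega)
          (by intro x hx; have := drop_le s hs w hw x hx; omega)
        have hperm2 : (gstep^[w*d] (List.replicate w (nth s (w-1)) ++ s.drop w)).Perm
            (List.replicate (w+1) (nth s w) ++ s.drop (w+1)) := by
          refine lv2.trans ?_
          rw [show nth s (w-1) - ((d:Nat):Int) = nth s w by omega]
          rw [List.drop_eq_getElem_cons hw, n2, hdropw]
        have hterm_eq : PySem.Int.floordiv ((w:Int) * (nth s (w-1) + nth s w + 1) * (nth s (w-1) - nth s w)) 2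
            = (w:Int) * (((d:Nat):Int) * nth s (w-1) - Tri d) := by
          have h2T := two_Tri d
          have hx : (w:Int) * (nth s (w-1) + nth s w + 1) * (nth s (w-1) - nth s w)
              = 2 * ((w:Int) * (((d:Nat):Int) * nth s (w-1) - Tri d)) := by
            rw [show nth s w = nth s (w-1) - ((d:Nat):Int) by omega]
            linear_combination (w:Int) * h2T
          rw [hx, PySem.Int.floordiv_eq_ediv_of_pos (by norm_num),
            Int.mul_ediv_cancel_left _ (by norm_num)]
        rw [hsum, R_add (w*d) _, lv1, R_perm _ hperm2, hterm_eq]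
        have hnthw : nth s (w + 1 - 1) = nth s w := rfl
        rw [hnthw]
        ring
      · rw [if_neg hc]
        have hwz : ((w : Nat) : Int) ≠ 0 := by
          simp only [ne_eq, Nat.cast_eq_zero]
          omega
        have hw0 : w ≠ 0 := by omega
        have hwc : (0:Int) < ((w : Nat) : Int) := by exact_mod_cast (by omega : 0 < w)
        have hdm : PySem.Int.divmod? rem ((w : Nat) : Int)
            = some (PySem.Int.floordiv rem ((w : Nat) : Int), PySem.Int.mod rem ((w : Nat) : Int)) := by
          simp [PySem.Int.divmod?, PySem.Int.floordiv, PySem.Int.mod, hw0]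
        simp only [hdm]
        have hqr := PySem.Int.floordiv_mul_add_mod rem ((w : Nat) : Int)
        have hq0 : 0 ≤ PySem.Int.floordiv rem ((w : Nat) : Int) := by
          rw [PySem.Int.floordiv_eq_ediv_of_pos hwc]
          exact Int.ediv_nonneg hrem (by omega)
        have hr0 : 0 ≤ PySem.Int.mod rem ((w : Nat) : Int) := PySem.Int.mod_nonneg rem hwc
        have hrlt : PySem.Int.mod rem ((w : Nat) : Int) < ((w : Nat) : Int) := by
          rw [PySem.Int.mod_eq_emod_of_pos hwc]
          exact Int.emod_lt_of_pos rem hwc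
        have hqd : PySem.Int.floordiv rem ((w : Nat) : Int) < ((d : Nat) : Int) := by
          rw [PySem.Int.floordiv_eq_ediv_of_pos hwc]
          rw [Int.ediv_lt_iff_lt_mul hwc]
          rw [hdc]
          push Not at hc
          linarith [hc]
        set q := PySem.Int.floordiv rem ((w : Nat) : Int) with hqdef
        set r := PySem.Int.mod rem ((w : Nat) : Int) with hrdef
        rw [bLoop_zero_rem, bTail_zero]
        have hb := batch_partial q.toNat r.toNat w (nth s (w-1)) (s.drop w) (by omega)
          (by omega)
          (by intro x hx
              have h1 := drop_le s hs w hw x hx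
              have h2 : ((q.toNat : Nat) : Int) = q := Int.toNat_of_nonneg hq0
              omega)
        have hcast : ((w : Nat) : Int) * q = ((w * q.toNat : Nat) : Int) := by
          push_cast
          rw [Int.toNat_of_nonneg hq0]
        have h5 : rem = ((w * q.toNat : Nat) : Int) + r := by
          rw [← hcast]
          linarith [hqr]
        have hsum : rem.toNat = w * q.toNat + r.toNat := by omega
        have hq' : ((q.toNat : Nat) : Int) = q := Int.toNat_of_nonneg hq0
        have hr' : ((r.toNat : Nat) : Int) = r := Int.toNat_of_nonneg hr0
        rw [hq', hr'] at hb
        have hTri : PySem.Int.floordiv (q * (q - 1)) 2 = Tri q.toNat := by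
          rw [← hq']
          exact Tri_floordiv q.toNat
        rw [hsum, hb, hTri]
        ring
    · have hbl : bLoop (f+1) s profit rem w = (profit, rem) := by
        simp only [bLoop, if_neg hg]
      rw [hbl]
      exact bTerm s w profit rem hw1 hw2 (by omega) hrem


-- ===== final assembly =====

-- ===== VERDICT (by name: the statement is the Claim_ definition above) =====
theorem findHighestProfit_spec : Claim_equal_findHighestProfit := by
  unfold Claim_equal_findHighestProfit
  intro inventory order _ hpre
  unfold Spec_findHighestProfit
  by_cases ho : order ≤ 0
  · have hz : order.toNat = 0 := by omega
    simp [findHighestProfit, findHighestProfit_alt, hz, ho, aLoop]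
  · push Not at ho
    have hinv : inventory ≠ [] := by
      intro h
      have := hpre h
      omega
    set s := PySem.List.sorted inventory id true with hsdef
    have hperm : s.Perm inventory := PySem.List.sorted_perm inventory id true
    have hslen : 0 < s.length := by
      rw [hperm.length_eq]
      exact List.length_pos_of_ne_nil hinv
    have hsdp : SDP s := by
      have hp := PySem.List.sorted_pairwise_rev inventory id
      rw [← hsdef, List.pairwise_iff_getElem] at hp
      intro j hj
      rw [nth_lt hj, nth_lt (show j < s.length by omega)]
      exact hp j (j+1) (by omega) hj (by omega)
    have hInvA : InvA s 0 := by
      refine ⟨hslen, fun j hj _ => hsdp j hj, ?_⟩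
      intro h0
      exact absurd h0 (lt_irrefl 0)
    have hordc : ((order.toNat : Nat) : Int) = order := Int.toNat_of_nonneg (by omega)
    have hA : findHighestProfit inventory order = R s order.toNat := by
      have h := aLoop_eq order.toNat s 0 0 hInvA
      rw [hordc] at h
      show aLoop order.toNat s 0 order 0 = R s order.toNat
      rw [h]
      ring
    have hs_eq : List.replicate 1 (nth s 0) ++ s.drop 1 = s := by
      have h1 : List.replicate 1 (nth s 0) ++ s.drop 1 = nth s 0 :: s.drop 1 := rfl
      rw [h1, nth_lt hslen]
      exact (List.drop_eq_getElem_cons hslen).symm.trans List.drop_zero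
    have hB : findHighestProfit_alt inventory order = R s order.toNat := by
      have halt : findHighestProfit_alt inventory order
          = bTail s (bLoop s.length s 0 order 1) := by
        unfold findHighestProfit_alt bTail
        rw [if_neg (by omega : ¬ order ≤ 0)]
      rw [halt, bLoop_eq s hsdp s.length 1 0 order (le_refl 1) hslen (by omega) (by omega)]
      rw [hs_eq]
      ring
    rw [hA, hB]
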